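/- GENERATED by mk_final_copies.py from the proof of the farm's unit `compute_window` (farm:compute_window.1: Proof.lean) as the
   re-elaboration sweep compiled it — do not edit. -/
import Asan.CheckWalk
import Vorbis.Spec.Units.compute_window

open X86 X86.User Asan Vorbis

set_option maxRecDepth 4000
set_option maxHeartbeats 16000000

namespace Vorbis.Spec.compute_window

/-- The loop counter `i < 2 ^ 31` read as a signed 32-bit number is `i`. -/
theorem counter_toInt (i : Nat) (h : i < 2 ^ 31) : (Word.part .w32 (UInt64.ofNat i)).toInt = (i : Int) := by
  have e : (Word.part .w32 (UInt64.ofNat i)).toNat = i := by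
    rw [Asan.part32_toNat, UInt64.toNat_ofNat']
    omega
  rw [Vorbis.Spec.toInt_of_lt _ (by omega), e]

/-- `n >> 1` (`sar edi, 1`) of a non-negative `int` read as a signed 32-bit number is `n / 2`. -/
theorem half_toInt (x : BitVec 32) (h : x.toNat < 2 ^ 31) : (x.sshiftRight 1).toInt = ((x.toNat / 2 : Nat) : Int) := by
  have hm : x.msb = false := by
    rw [BitVec.msb_eq_decide]
    simp only [decide_eq_false_iff_not, Nat.not_le]
    omega
  have e : (x.sshiftRight 1).toNat = x.toNat / 2 := by
    rw [BitVec.toNat_sshiftRight_of_msb_false hm, Nat.shiftRight_eq_div_pow]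
  rw [Vorbis.Spec.toInt_of_lt _ (by omega), e]

/-- The loop test `cmp ebx, ebp ; jl` as a comparison of numbers. -/
theorem test_iff (u : State) (i n2 : Nat) (hn : Vorbis.Spec.arg32 u .rdi < 2 ^ 31)
    (hn2 : Vorbis.Spec.arg32 u .rdi / 2 = n2) (hi : i ≤ n2) :
    (Word.part .w32 (UInt64.ofNat i)).toInt < ((Word.part .w32 (u.reg .rdi)).sshiftRight 1).toInt ↔ i < n2 := by
  rw [Vorbis.Spec.arg32_def] at hn hn2
  have hx : (Word.part .w32 (u.reg .rdi)).toNat < 2 ^ 31 := by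
    rw [Asan.part32_toNat]
    exact hn
  rw [counter_toInt i (by omega), half_toInt _ hx, Asan.part32_toNat, hn2]
  omega

/-- The low half of the loop counter `i < 2 ^ 31`, as a number. -/
theorem counter_part (i : Nat) (h : i < 2 ^ 31) : (Word.part .w32 (UInt64.ofNat i)).toNat = i := by
  rw [Asan.part32_toNat, UInt64.toNat_ofNat']
  omega

/-- `&window[i]` (`movsxd rax, ebx ; lea r14, [r12 + rax*4]`) is `window + 4 i`. -/
theorem elem_addr (p : Word) (i : Nat) (hi : i < 2 ^ 31) (hp : p.toNat + 4 * i < 2 ^ 64) :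
    (p + Word.ofBV (BitVec.signExtend 64 (Word.part .w32 (UInt64.ofNat i))) * 4).toNat = p.toNat + 4 * i := by
  have hx : (Word.ofBV (BitVec.signExtend 64 (Word.part .w32 (UInt64.ofNat i)))).toNat = i := by
    rw [Vorbis.Spec.toNat_sext32 _ (by rw [counter_part i hi]; exact hi), counter_part i hi]
  exact Vorbis.Spec.add_mul4 p _ i hx hp

/-- `++i` (`add ebx, 1`) of the loop counter `i < 2 ^ 31` is `i + 1`. -/
theorem counter_succ (i : Nat) (hi : i < 2 ^ 31) :
    Word.ofBV (Word.part .w32 (UInt64.ofNat i) + 1#32) = UInt64.ofNat (i + 1) := by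
  apply UInt64.toNat_inj.mp
  rw [Vorbis.toNat_ofBV32, BitVec.toNat_add, counter_part i hi, UInt64.toNat_ofNat']
  have e1 : (1#32).toNat = 1 := by decide
  rw [e1]
  omega

end Vorbis.Spec.compute_window

/-- `compute_window(n, window)` satisfies its contract (stb_vorbis_fixed.c:1298-1303): five pushes, the loop
`for (i = 0; i < n2; ++i)` at 0x10c103 (invariant: ebx = `i ≤ n2`, only the stack window and the floats were written, no
shadow byte, the six stack slots, DF, the MXCSR masks; measure `n2 - i`), whose body calls `sin`, `square`, `sin` (after
each call the stack slots, the footprint and "shadow untouched" are restated for the returned state) and makes ONE checked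
store `window[i] = …` (0x10c0f8: inside the live floats, `LiveBytes.accSmall`); then five pops and the `ret`. -/
theorem Vorbis.Spec.Worked.compute_window_ok : Vorbis.Spec.compute_window.Statement := by
  intro Lay hLay μ hμ u₀ hcode h_sin h_square hstore4 others frames u ret he hpre
  v_entry he
  obtain ⟨hsh, hn, hlive⟩ := hpre
  -- the callees' contracts, instantiated so that the walker finds them
  have hsin := h_sin others frames
  have hsq := h_square others frames
  have hsp := hsh.rsp
  -- `n2 = n >> 1` (line 1300), a number below 2 ^ 30
  obtain ⟨n2, hn2⟩ : ∃ n2 : Nat, Vorbis.Spec.arg32 u .rdi / 2 = n2 := ⟨_, rfl⟩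
  have hn2lt : n2 < 2 ^ 30 := by omega
  -- where the window is: one arithmetic fact
  have hwhere : n2 = 0 ∨
      (0x119d40 ≤ (u.reg .rsi).toNat ∧ (u.reg .rsi).toNat + 4 * n2 ≤ 0xC00000 ∧
        ((u.reg .rsp).toNat + 8 ≤ (u.reg .rsi).toNat ∨ (u.reg .rsi).toNat + 4 * n2 ≤ 0x700000 ∨
          0x800000 ≤ (u.reg .rsi).toNat)) := by
    by_cases hz : n2 = 0
    · exact Or.inl hz
    · rw [← hn2]
      exact Or.inr (hlive.where_ hsh.inv hsh.offText (by omega) (by omega))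
  -- 0x10c080 … 0x10c094: the pushes, `n2 = n >> 1`, `i = 0`, the jump to the loop head
  u_walk hcode [hμ.vendor] until [Vorbis.L.compute_window.loop1] span [Vorbis.L.textLo, Vorbis.L.textHi] side (v_side)
  -- 0x10c103, the loop head (line 1301): what varies is generalised, the exact memory is replaced by what stays true
  obtain ⟨i, hi, hile⟩ : ∃ i : Nat, s_10c094.reg .rbx = UInt64.ofNat i ∧ i ≤ n2 :=
    ⟨0, w_rbx, Nat.zero_le _⟩
  have hsame : Mem.SameExcept [⟨(u.reg .rsp).toNat - 80, (u.reg .rsp).toNat⟩,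
      ⟨(u.reg .rsi).toNat, (u.reg .rsi).toNat + 4 * (Vorbis.Spec.arg32 u .rdi / 2)⟩] u.mem s_10c094.mem := by
    u_same
  have hun : ShadowUntouched u.mem s_10c094.mem := by v_untouched
  have hs1 : UInt64.ofNat (s_10c094.mem.readLE (u.reg .rsp - 8) 8) = u.reg .r14 := by u_resolve
  have hs2 : UInt64.ofNat (s_10c094.mem.readLE (u.reg .rsp - 16) 8) = u.reg .r13 := by u_resolve
  have hs3 : UInt64.ofNat (s_10c094.mem.readLE (u.reg .rsp - 24) 8) = u.reg .r12 := by u_resolve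
  have hs4 : UInt64.ofNat (s_10c094.mem.readLE (u.reg .rsp - 32) 8) = u.reg .rbp := by u_resolve
  have hs5 : UInt64.ofNat (s_10c094.mem.readLE (u.reg .rsp - 40) 8) = u.reg .rbx := by u_resolve
  have hs0 : UInt64.ofNat (s_10c094.mem.readLE (u.reg .rsp) 8) = ret := by u_resolve
  have hdf : s_10c094.flags .df = false := by
    rw [w_flags]
    simp only [X86.User.df_setStatus]
    exact he_df
  have hmx : s_10c094.mxcsr &&& 0x1F80 = 0x1F80 := by
    rw [w_mxcsr]
    exact he_mx
  replace w_kept := w_kept.mono_all (S' := [.rbx, .rbp, .rdi, .r12, .rsp, .r13, .r14, .rax, .rcx, .rdx, .rsi, .r8, .r9,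
    .r10, .r11, .r16, .r17, .r18, .r19, .r20, .r21, .r22, .r23, .r24, .r25, .r26, .r27, .r28, .r29, .r30, .r31]) (by rfl)
  clear w_mem w_flags w_mxcsr w_rbx w_rdi
  u_loop [i] (fun v => n2 - (v.reg .rbx).toNat)
  -- 0x10c103 `cmp ebx, ebp ; jl`: the body up to the first call (0x10c0c2, line 1302), and the exit up to the `ret`
  u_walk hcode [hμ.vendor] until [Vorbis.L.compute_window.loop1] span [Vorbis.L.textLo, Vorbis.L.textHi] side (v_side)
  case call_inv => v_inv
  case pre_10c0c2 =>
    -- the precondition of `sin` at 0x10c0c2: only pushes so far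
    have hlt : i < n2 := (Vorbis.Spec.compute_window.test_iff u i n2 hn hn2 hile).mp hbr_10c105
    obtain ⟨hw1, hw2, hw3⟩ := hwhere.resolve_left (by omega)
    show ShadowPre others frames s_10c0c2
    refine hsh.callee ?_ ?_ ?_ ?_
    · v_untouched
    · rw [w_rsp]
      u_omega
    · rw [w_rsp]
      u_omega
    · rw [w_rsp]
      u_omega
  · -- 0x10c0c7, after the first call of `sin`: `i < n2`, so the window is not empty
    have hlt : i < n2 := (Vorbis.Spec.compute_window.test_iff u i n2 hn hn2 hile).mp hbr_10c105
    obtain ⟨hw1, hw2, hw3⟩ := hwhere.resolve_left (by omega)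
    v_after_call w_rsp_10c0c2 w_mem_10c0c2
    have ht0 : UInt64.ofNat (s_10c0c2r.mem.readLE (u.reg .rsp) 8) = ret := by u_frame hs0
    have ht1 : UInt64.ofNat (s_10c0c2r.mem.readLE (u.reg .rsp - 8) 8) = u.reg .r14 := by u_frame hs1
    have ht2 : UInt64.ofNat (s_10c0c2r.mem.readLE (u.reg .rsp - 16) 8) = u.reg .r13 := by u_frame hs2
    have ht3 : UInt64.ofNat (s_10c0c2r.mem.readLE (u.reg .rsp - 24) 8) = u.reg .r12 := by u_frame hs3
    have ht4 : UInt64.ofNat (s_10c0c2r.mem.readLE (u.reg .rsp - 32) 8) = u.reg .rbp := by u_frame hs4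
    have ht5 : UInt64.ofNat (s_10c0c2r.mem.readLE (u.reg .rsp - 40) 8) = u.reg .rbx := by u_frame hs5
    have hun1 : ShadowUntouched u.mem s_10c0c2r.mem := by v_untouched
    have hsame1 : Mem.SameExcept [⟨(u.reg .rsp).toNat - 80, (u.reg .rsp).toNat⟩,
        ⟨(u.reg .rsi).toNat, (u.reg .rsi).toNat + 4 * (Vorbis.Spec.arg32 u .rdi / 2)⟩] u.mem s_10c0c2r.mem := by
      u_same
    clear w_same w_post hs0 hs1 hs2 hs3 hs4 hs5 hsame hun
    -- 0x10c0c7 … 0x10c0cb: up to the call of `square`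
    u_walk hcode [hμ.vendor] until [Vorbis.L.compute_window.loop1] span [Vorbis.L.textLo, Vorbis.L.textHi] side (v_side)
    case call_inv => v_inv
    case pre_10c0cb =>
      show ShadowPre others frames s_10c0cb
      refine hsh.callee ?_ ?_ ?_ ?_
      · v_untouched
      · rw [w_rsp]
        u_omega
      · rw [w_rsp]
        u_omega
      · rw [w_rsp]
        u_omega
    -- 0x10c0d0, after the call of `square`: the memory is the memory at its entry
    v_after_call w_rsp_10c0cb w_mem_10c0cb
    have w_mem : s_10c0cbr.mem = s_10c0c2r.mem.writeLE (u.reg Reg.rsp - 48) 8 1097936 :=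
      (show s_10c0cbr.mem = s_10c0cb.mem from w_post).trans w_mem_10c0cb
    clear w_same w_post
    -- 0x10c0d0 … 0x10c0dc: up to the second call of `sin`
    u_walk hcode [hμ.vendor] until [Vorbis.L.compute_window.loop1] span [Vorbis.L.textLo, Vorbis.L.textHi] side (v_side)
    case call_inv => v_inv
    case pre_10c0dc =>
      show ShadowPre others frames s_10c0dc
      refine hsh.callee ?_ ?_ ?_ ?_
      · v_untouched
      · rw [w_rsp]
        u_omega
      · rw [w_rsp]
        u_omega
      · rw [w_rsp]
        u_omega
    -- 0x10c0e1, after the second call of `sin`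
    v_after_call w_rsp_10c0dc w_mem_10c0dc
    have hv0 : UInt64.ofNat (s_10c0dcr.mem.readLE (u.reg .rsp) 8) = ret := by u_frame ht0
    have hv1 : UInt64.ofNat (s_10c0dcr.mem.readLE (u.reg .rsp - 8) 8) = u.reg .r14 := by u_frame ht1
    have hv2 : UInt64.ofNat (s_10c0dcr.mem.readLE (u.reg .rsp - 16) 8) = u.reg .r13 := by u_frame ht2
    have hv3 : UInt64.ofNat (s_10c0dcr.mem.readLE (u.reg .rsp - 24) 8) = u.reg .r12 := by u_frame ht3
    have hv4 : UInt64.ofNat (s_10c0dcr.mem.readLE (u.reg .rsp - 32) 8) = u.reg .rbp := by u_frame ht4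
    have hv5 : UInt64.ofNat (s_10c0dcr.mem.readLE (u.reg .rsp - 40) 8) = u.reg .rbx := by u_frame ht5
    have hun2 : ShadowUntouched u.mem s_10c0dcr.mem := by v_untouched
    have hsame2 : Mem.SameExcept [⟨(u.reg .rsp).toNat - 80, (u.reg .rsp).toNat⟩,
        ⟨(u.reg .rsi).toNat, (u.reg .rsi).toNat + 4 * (Vorbis.Spec.arg32 u .rdi / 2)⟩] u.mem s_10c0dcr.mem := by
      u_same
    clear w_same w_post ht0 ht1 ht2 ht3 ht4 ht5 hsame1 hun1
    -- `&window[i]` as a number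
    have haddr : (u.reg .rsi + Word.ofBV (BitVec.signExtend 64 (Word.part .w32 (UInt64.ofNat i))) * 4).toNat =
        (u.reg .rsi).toNat + 4 * i :=
      Vorbis.Spec.compute_window.elem_addr _ i (by omega) (by omega)
    -- 0x10c0e1 … 0x10c100: the address, the float bits, the check, the store, `++i`, back to the head
    u_walk hcode [hμ.vendor] until [Vorbis.L.compute_window.loop1] span [Vorbis.L.textLo, Vorbis.L.textHi] side (v_side)
    · -- 0x10c0f8, the check of the store `window[i] = …` (line 1302): inside the live floats, no store went to the shadow
      have hun3 : ShadowUntouched u.mem s_10c0f8.mem := by v_untouched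
      refine hlive.accSmall hsh.inv hun3 _ 4 (by decide) ?_ ?_
      · rw [haddr]
        omega
      · rw [haddr]
        omega
    · -- 0x10c100 → 0x10c103: the back edge
      u_loop_back [i + 1]
      · -- `++i`
        rw [w_rbx]
        exact Vorbis.Spec.compute_window.counter_succ i (by omega)
      · -- `i + 1 ≤ n2`
        omega
      · -- still no store to the shadow
        v_untouched
      · -- the direction flag: the check kept it (`w_df_10c0f8`), the `add` wrote status flags only
        rw [w_flags]
        simp only [X86.User.df_setStatus]
        exact w_df_10c0f8
      · -- the SSE exception masks
        rw [w_mxcsr]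
        exact hmx_10c0ec
      · -- the measure `n2 - i` decreases
        rw [w_rbx, Vorbis.Spec.compute_window.counter_succ i (by omega), UInt64.toNat_ofNat', UInt64.toNat_ofNat']
        omega
  · -- 0x10c107 … 0x10c10f, the exit (`i ≥ n2`), walked to the `ret`: the contract's `Returned`
    refine ReachVia.done (Or.inl ?_)
    v_returned
    · -- the post: no shadow byte was written
      show ShadowUntouched u.mem s_10c10f.mem
      rw [w_mem]
      exact hun
    · -- `same`: the footprint is the invariant's `hsame` (`vspec` would unfold `arg32` in the window: named lemmas instead)
      simp only [X86.User.Spec.footprint, Vorbis.Spec.compute_window.spec_frame,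
        Vorbis.Spec.compute_window.spec_writes]
      rw [w_mem]
      exact hsame
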